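-- pv_equiv track=rewrite | github.com/sugarlabs/sugar | src/jarabe/view/customizebundle.py | _extract_svg_payload
-- ===== SOURCE A (Python) =====
-- def _extract_svg_payload(fd):
--     """Returns everything between <svg ...> and </svg>"""
--     payload = ''
--     looking_for_start_svg_token = True
--     looking_for_close_token = True
--     looking_for_end_svg_token = True
--     for line in fd:
--         if looking_for_start_svg_token:
--             if line.find('<svg') < 0:
--                 continue
--             looking_for_start_svg_token = False
--             line = line.split('<svg', 1)[1]
--         if looking_for_close_token:
--             if line.find('>') < 0:
--                 continue
--             looking_for_close_token = False
--             line = line.split('>', 1)[1]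
--         if looking_for_end_svg_token:
--             if line.find('</svg>') < 0:
--                 payload += line
--                 continue
--             payload += line.split('</svg>')[0]
--             break
--     return payload
-- ===== SOURCE B (Python) =====
-- def _extract_svg_payload(fd):
--     """Returns everything between <svg ...> and </svg>"""
--
--     def after_token(chunks, token):
--         # first suffix strictly after the first occurrence of token,
--         # scanning chunk by chunk; None if the token never appears
--         for idx, chunk in enumerate(chunks):
--             if token in chunk:
--                 return [chunk.split(token, 1)[1]] + chunks[idx + 1:]
--         return None
--
--     chunks = after_token(list(fd), '<svg')
--     if chunks is None:
--         return ''
--     chunks = after_token(chunks, '>')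
--     if chunks is None:
--         return ''
--     out = []
--     for chunk in chunks:
--         if '</svg>' in chunk:
--             out.append(chunk.split('</svg>')[0])
--             break
--         out.append(chunk)
--     return ''.join(out)
-- ===== Notes on version B (the rewrite author's own statement) =====
-- stated objective: alternative
-- what changed: Replaced A's single streaming loop with three boolean state flags by a pipeline: one reusable after_token scan applied twice (for '<svg' and its closing '>'), then a collect loop that gathers chunks up to '</svg>' and joins them once at the end.
import Mathlib
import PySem

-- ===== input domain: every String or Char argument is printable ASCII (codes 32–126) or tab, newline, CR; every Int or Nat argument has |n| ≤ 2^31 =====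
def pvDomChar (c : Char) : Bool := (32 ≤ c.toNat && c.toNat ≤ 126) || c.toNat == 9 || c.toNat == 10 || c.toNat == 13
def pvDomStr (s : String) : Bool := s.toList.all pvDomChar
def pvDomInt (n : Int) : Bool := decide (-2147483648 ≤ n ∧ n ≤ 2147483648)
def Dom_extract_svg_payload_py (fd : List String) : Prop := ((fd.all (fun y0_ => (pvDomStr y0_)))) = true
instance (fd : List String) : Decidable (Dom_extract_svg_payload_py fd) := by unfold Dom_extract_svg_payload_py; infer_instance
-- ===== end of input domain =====

-- B replaces A's single loop with three state flags by a token-scan helper applied twice plus a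
-- final collect-and-join loop: a different decomposition of the same task, same cost.

-- ===== PORT A =====
-- A's for-loop: s/c/e are the three looking_for_* flags, payload the accumulator;
-- line.split(tok, 1)[1] is splitMax? … 1 |>.getD 1 "", line.split(tok)[0] is split? … |>.getD 0 ""
def pvGoA : List String → String → Bool → Bool → Bool → String
  | [], payload, _s, _c, _e => payload
  | line :: tl, payload, s, c, e =>
    if s && decide (PySem.Str.find line "<svg" < 0) then pvGoA tl payload s c e
    else
      let line1 := if s then ((PySem.Str.splitMax? line "<svg" 1).getD []).getD 1 "" else line
      if c && decide (PySem.Str.find line1 ">" < 0) then pvGoA tl payload false c e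
      else
        let line2 := if c then ((PySem.Str.splitMax? line1 ">" 1).getD []).getD 1 "" else line1
        if e && decide (PySem.Str.find line2 "</svg>" < 0) then
          pvGoA tl (payload ++ line2) false false e
        else if e then payload ++ (((PySem.Str.split? line2 "</svg>").getD []).getD 0 "")
        else pvGoA tl payload false false e

def extract_svg_payload_py (fd : List String) : String := pvGoA fd "" true true true

-- ===== PORT B =====
-- after_token: first suffix strictly after the first occurrence of token, chunk by chunk; none if absent
def pvAfterToken : List String → String → Option (List String)
  | [], _tok => none
  | chunk :: rest, tok =>
    if PySem.Str.isIn tok chunk then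
      some ((((PySem.Str.splitMax? chunk tok 1).getD []).getD 1 "") :: rest)
    else pvAfterToken rest tok

-- the final collect loop: whole chunks until one contains '</svg>', then the prefix before it
def pvCollect : List String → List String
  | [] => []
  | chunk :: rest =>
    if PySem.Str.isIn "</svg>" chunk then
      [((PySem.Str.split? chunk "</svg>").getD []).getD 0 ""]
    else chunk :: pvCollect rest

def extract_svg_payload_py_alt (fd : List String) : String :=
  match pvAfterToken fd "<svg" with
  | none => ""
  | some chunks1 =>
    match pvAfterToken chunks1 ">" with
    | none => ""
    | some chunks2 => PySem.Str.join "" (pvCollect chunks2)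

-- ===== PRECONDITION & SPEC =====
def Spec_extract_svg_payload_py (fd : List String) (out : String) : Prop := out = extract_svg_payload_py_alt fd
instance (fd : List String) (out : String) : Decidable (Spec_extract_svg_payload_py fd out) := by unfold Spec_extract_svg_payload_py; infer_instance

-- ===== CLAIM (what is proved, stated in full; the proofs are below) =====
def Claim_equal_extract_svg_payload_py : Prop := ∀ (fd : List String), Dom_extract_svg_payload_py fd → Spec_extract_svg_payload_py fd (extract_svg_payload_py fd)

-- ===== LEMMAS AND PROOFS =====

theorem pv_intersperse_nil_flatten (l : List (List Char)) :
    (List.intersperse [] l).flatten = l.flatten := by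
  induction l with
  | nil => rfl
  | cons a l ih =>
    cases l with
    | nil => rfl
    | cons b t => simp_all [List.intersperse]

theorem pv_join_nil : PySem.Str.join "" ([] : List String) = "" := by rfl

theorem pv_join_cons (a : String) (l : List String) :
    PySem.Str.join "" (a :: l) = a ++ PySem.Str.join "" l := by
  apply String.toList_inj.mp
  simp [PySem.Str.join, PySem.Chars.join, List.intercalate, pv_intersperse_nil_flatten]

-- A's test `line.find(tok) < 0` is the negation of B's `tok in line`
theorem pv_find_lt (s tok : List Char) :
    PySem.Chars.find s tok < 0 ↔ PySem.Chars.isIn tok s = false := by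
  have h1 := PySem.Chars.neg_one_le_find s tok
  rw [PySem.Chars.isIn_eq_false_iff, ← PySem.Chars.find_eq_neg_one_iff]
  omega

-- end phase of A's loop (flags s = c = false, e = true) = B's collect loop joined
theorem pv_phaseE (tl : List String) : ∀ payload,
    pvGoA tl payload false false true = payload ++ PySem.Str.join "" (pvCollect tl) := by
  induction tl with
  | nil => intro payload; simp [pvGoA, pvCollect, pv_join_nil]
  | cons chunk tl ih =>
    intro payload
    by_cases h : PySem.Chars.isIn ['<', '/', 's', 'v', 'g', '>'] chunk.toList = true
    · have hf : ¬ (PySem.Chars.find chunk.toList ['<', '/', 's', 'v', 'g', '>'] < 0) := by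
        rw [pv_find_lt]; simp [h]
      simp [pvGoA, pvCollect, hf, h, pv_join_cons, pv_join_nil]
    · have hf : PySem.Chars.find chunk.toList ['<', '/', 's', 'v', 'g', '>'] < 0 := by
        rw [pv_find_lt]; simpa using h
      simp [pvGoA, pvCollect, hf, h, ih, pv_join_cons, String.append_assoc]

-- close phase of A's loop (s = false, c = e = true, payload empty) = B after the '>' scan
theorem pv_phaseC (tl : List String) :
    pvGoA tl "" false true true =
      (match pvAfterToken tl ">" with
       | none => ""
       | some chunks2 => PySem.Str.join "" (pvCollect chunks2)) := by
  induction tl with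
  | nil => rfl
  | cons line tl ih =>
    by_cases h : PySem.Chars.isIn ['>'] line.toList = true
    · have hf : ¬ (PySem.Chars.find line.toList ['>'] < 0) := by
        rw [pv_find_lt]; simp [h]
      have key : pvGoA (line :: tl) "" false true true =
          pvGoA ((((PySem.Str.splitMax? line ">" 1).getD []).getD 1 "") :: tl) "" false false true := by
        simp [pvGoA, hf]
      rw [key, pv_phaseE]
      simp [pvAfterToken, h]
    · have hf : PySem.Chars.find line.toList ['>'] < 0 := by
        rw [pv_find_lt]; simpa using h
      simp [pvGoA, pvAfterToken, hf, h, ih]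

theorem pv_main (fd : List String) : extract_svg_payload_py fd = extract_svg_payload_py_alt fd := by
  unfold extract_svg_payload_py extract_svg_payload_py_alt
  induction fd with
  | nil => rfl
  | cons line tl ih =>
    by_cases h : PySem.Chars.isIn ['<', 's', 'v', 'g'] line.toList = true
    · have hf : ¬ (PySem.Chars.find line.toList ['<', 's', 'v', 'g'] < 0) := by
        rw [pv_find_lt]; simp [h]
      have key : pvGoA (line :: tl) "" true true true =
          pvGoA ((((PySem.Str.splitMax? line "<svg" 1).getD []).getD 1 "") :: tl) "" false true true := by
        simp [pvGoA, hf]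
      rw [key, pv_phaseC]
      simp [pvAfterToken, h]
    · have hf : PySem.Chars.find line.toList ['<', 's', 'v', 'g'] < 0 := by
        rw [pv_find_lt]; simpa using h
      simp [pvGoA, pvAfterToken, hf, h, ih]

-- ===== VERDICT (by name: the statement is the Claim_ definition above) =====
theorem extract_svg_payload_py_spec : Claim_equal_extract_svg_payload_py := by
  intro fd _
  unfold Spec_extract_svg_payload_py
  exact pv_main fd
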